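-- pv_equiv track=rewrite | github.com/kosiew/alfred-workflows | ghs.py | process_repositories
-- ===== SOURCE A (Python) =====
-- from typing import List, Tuple, Optional
--
-- def process_repositories(
--     repos: List[Tuple[str, Optional[str], bool]]
-- ) -> List[Tuple[str, Optional[str], bool]]:
--     """Deduplicate and sort repositories.
--
--     Repositories are unique by full name and non-forked repositories are
--     listed before forks, preserving the first occurrence of each name.
--     """
--     seen = set()
--     unique: List[Tuple[str, Optional[str], bool]] = []
--     for name, desc, fork in repos:
--         if name in seen or not name:
--             continue
--         seen.add(name)
--         unique.append((name, desc, fork))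
--
--     nonfork = [r for r in unique if not r[2]]
--     forked = [r for r in unique if r[2]]
--     return nonfork + forked
-- ===== SOURCE B (Python) =====
-- from typing import List, Tuple, Optional
--
-- def process_repositories(
--     repos: List[Tuple[str, Optional[str], bool]]
-- ) -> List[Tuple[str, Optional[str], bool]]:
--     """Deduplicate by full name (first occurrence wins, falsy names dropped),
--     then stable-sort on the fork flag so non-forks precede forks."""
--     first = {}
--     for name, desc, fork in repos:
--         if name and name not in first:
--             first[name] = (name, desc, fork)
--     return sorted(first.values(), key=lambda r: r[2])
-- ===== Notes on version B (the rewrite author's own statement) =====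
-- stated objective: simpler
-- what changed: The seen-set plus append loop becomes a single name-keyed dict insertion, and the explicit two-comprehension partition plus concatenation is replaced by one stable sort on the boolean fork flag (False < True).
import Mathlib
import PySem

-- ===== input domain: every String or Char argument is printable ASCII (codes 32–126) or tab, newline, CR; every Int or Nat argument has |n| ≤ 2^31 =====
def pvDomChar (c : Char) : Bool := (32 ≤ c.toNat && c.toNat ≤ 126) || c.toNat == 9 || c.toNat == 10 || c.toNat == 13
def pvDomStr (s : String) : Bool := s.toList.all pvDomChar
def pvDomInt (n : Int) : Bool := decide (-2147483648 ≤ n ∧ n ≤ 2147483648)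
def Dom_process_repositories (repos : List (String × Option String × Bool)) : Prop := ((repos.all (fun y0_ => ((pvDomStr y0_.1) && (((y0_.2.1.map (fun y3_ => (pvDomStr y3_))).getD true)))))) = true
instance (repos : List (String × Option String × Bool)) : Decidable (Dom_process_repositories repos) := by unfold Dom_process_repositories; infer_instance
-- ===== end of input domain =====

-- B replaces A's seen-set loop + two-comprehension partition by a name-keyed dict and one
-- stable sort on the fork flag (simpler; same return value, no observable side effects).

-- ===== PORT A =====
-- the for-loop: state (seen, unique); 'if name in seen or not name: continue' then add/append
def process_repositories (repos : List (String × Option String × Bool)) :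
    List (String × Option String × Bool) :=
  let st := repos.foldl
    (fun (st : PySem.Set String × List (String × Option String × Bool)) r =>
      if st.1.contains r.1 ∨ r.1 = "" then st
      else (st.1.add r.1, st.2 ++ [r]))
    (PySem.Set.empty, [])
  let unique := st.2
  let nonfork := unique.filter (fun r => !r.2.2)
  let forked := unique.filter (fun r => r.2.2)
  nonfork ++ forked

-- ===== PORT B =====
-- dict 'first' keyed by name ('if name and name not in first'), then sorted(..., key=fork flag)
def process_repositories_alt (repos : List (String × Option String × Bool)) :
    List (String × Option String × Bool) :=
  let first := repos.foldl
    (fun (d : PySem.Dict String (String × Option String × Bool)) r =>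
      if ¬ r.1 = "" ∧ ¬ d.contains r.1 = true then d.insert r.1 r else d)
    PySem.Dict.empty
  PySem.List.sorted first.values (fun r => r.2.2)

-- ===== PRECONDITION & SPEC =====
def Spec_process_repositories (repos : List (String × Option String × Bool)) (out : List (String × Option String × Bool)) : Prop := out = process_repositories_alt repos
instance (repos : List (String × Option String × Bool)) (out : List (String × Option String × Bool)) : Decidable (Spec_process_repositories repos out) := by unfold Spec_process_repositories; infer_instance

-- ===== CLAIM (what is proved, stated in full; the proofs are below) =====
def Claim_equal_process_repositories : Prop := ∀ (repos : List (String × Option String × Bool)), Dom_process_repositories repos → Spec_process_repositories repos (process_repositories repos)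

-- ===== LEMMAS AND PROOFS =====

-- A's dedup loop and B's dict loop keep the same records in the same order.
theorem dedup_eq (repos : List (String × Option String × Bool))
    (s : PySem.Set String) (u : List (String × Option String × Bool))
    (d : PySem.Dict String (String × Option String × Bool))
    (hc : ∀ n, s.contains n = d.contains n) (hv : u = d.values) :
    (repos.foldl
      (fun (st : PySem.Set String × List (String × Option String × Bool)) r =>
        if st.1.contains r.1 ∨ r.1 = "" then st
        else (st.1.add r.1, st.2 ++ [r]))
      (s, u)).2
    = (repos.foldl
      (fun (d : PySem.Dict String (String × Option String × Bool)) r =>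
        if ¬ r.1 = "" ∧ ¬ d.contains r.1 = true then d.insert r.1 r else d)
      d).values := by
  induction repos generalizing s u d with
  | nil => simpa using hv
  | cons r rest ih =>
    simp only [List.foldl_cons]
    by_cases hskip : s.contains r.1 = true ∨ r.1 = ""
    · have hskip' : ¬ (¬ r.1 = "" ∧ ¬ d.contains r.1 = true) := by
        rcases hskip with h | h
        · rw [hc] at h; tauto
        · tauto
      rw [if_pos hskip, if_neg hskip']
      exact ih s u d hc hv
    · rw [not_or] at hskip
      obtain ⟨hns, hne⟩ := hskip
      have hnd : ¬ d.contains r.1 = true := by rw [← hc]; exact hns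
      have hmem : r.1 ∉ s := by simpa [PySem.Set.contains] using hns
      have hnd' : d.contains r.1 = false := Bool.eq_false_iff.2 hnd
      simp only [PySem.Dict.contains] at hnd'
      rw [if_neg (by simp [PySem.Set.contains, hmem, hne]), if_pos ⟨hne, hnd⟩]
      apply ih
      · intro n
        have hc' := hc n
        simp [PySem.Set.contains, PySem.Dict.contains] at hc'
        by_cases hn : n = r.1
        · subst hn
          simp [PySem.Set.add, PySem.Set.contains, PySem.Dict.insert,
            PySem.Dict.contains, hmem, hnd']
        · simp [PySem.Set.add, PySem.Set.contains, PySem.Dict.insert,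
            PySem.Dict.contains, hmem, hnd', hc', hn, Ne.symm hn]
      · simp [PySem.Set.add, PySem.Set.contains, hmem, PySem.Dict.insert, hnd',
          PySem.Dict.contains, PySem.Dict.values, hv]

-- inserting a non-fork lands at the end of the non-fork block
theorem insertBy_key_false {α : Type} (key : α → Bool) (x : α) (hx : key x = false)
    (A B : List α) (hA : ∀ a ∈ A, key a = false) (hB : ∀ b ∈ B, key b = true) :
    PySem.List.insertBy (fun a b => decide (key a < key b)) x (A ++ B) = A ++ x :: B := by
  induction A with
  | nil =>
    cases B with
    | nil => rfl
    | cons b B' =>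
      have hb : key b = true := hB b (by simp)
      simp [PySem.List.insertBy, hx, hb]
  | cons a A' ih =>
    have ha : key a = false := hA a (by simp)
    have : PySem.List.insertBy (fun a b => decide (key a < key b)) x (A' ++ B) = A' ++ x :: B :=
      ih (fun a ha' => hA a (by simp [ha'])) 
    simp [PySem.List.insertBy, hx, ha, this]

-- inserting a fork lands at the very end
theorem insertBy_key_true {α : Type} (key : α → Bool) (x : α) (hx : key x = true)
    (ys : List α) :
    PySem.List.insertBy (fun a b => decide (key a < key b)) x ys = ys ++ [x] := by
  apply PySem.List.insertBy_of_forall_not_before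
  intro y _
  simp [hx]

-- the insertion sort on a Bool key is exactly the two-bucket partition
theorem foldl_insertBy_partition {α : Type} (key : α → Bool) (xs : List α) :
    ∀ (A B : List α), (∀ a ∈ A, key a = false) → (∀ b ∈ B, key b = true) →
    xs.foldl (fun acc x => PySem.List.insertBy (fun a b => decide (key a < key b)) x acc) (A ++ B)
      = (A ++ xs.filter (fun x => !key x)) ++ (B ++ xs.filter (fun x => key x)) := by
  induction xs with
  | nil => intro A B _ _; simp
  | cons x xs ih =>
    intro A B hA hB
    simp only [List.foldl_cons]
    cases hx : key x with
    | false =>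
      rw [insertBy_key_false key x hx A B hA hB]
      have : A ++ x :: B = (A ++ [x]) ++ B := by simp
      rw [this, ih (A ++ [x]) B
        (by intro a ha; rcases List.mem_append.1 ha with h | h
            · exact hA a h
            · simp at h; subst h; exact hx) hB]
      simp [hx]
    | true =>
      rw [insertBy_key_true key x hx (A ++ B)]
      have : (A ++ B) ++ [x] = A ++ (B ++ [x]) := by simp
      rw [this, ih A (B ++ [x]) hA
        (by intro b hb; rcases List.mem_append.1 hb with h | h
            · exact hB b h
            · simp at h; subst h; exact hx)]
      simp [hx]

theorem sorted_bool_key_partition {α : Type} (key : α → Bool) (xs : List α) :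
    PySem.List.sorted xs key = xs.filter (fun x => !key x) ++ xs.filter (fun x => key x) := by
  rw [PySem.List.sorted_eq_foldl_insertBy]
  have := foldl_insertBy_partition key xs [] [] (by simp) (by simp)
  simpa using this

-- ===== VERDICT (by name: the statement is the Claim_ definition above) =====
theorem process_repositories_spec : Claim_equal_process_repositories := by
  intro repos _
  show process_repositories repos = process_repositories_alt repos
  simp only [process_repositories, process_repositories_alt]
  rw [sorted_bool_key_partition]
  rw [dedup_eq repos PySem.Set.empty [] PySem.Dict.empty
    (by intro n; rfl) rfl]
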